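-- pv_equiv track=rewrite | github.com/stonedseeker/leetcode | test.py | decipher_scrolls
-- ===== SOURCE A (Python) =====
-- def decipher_scrolls(astrolabe: str, scrolls: list[str]) -> list[int]:
--     """
--     Deciphers scrolls using a circular astrolabe to find the shortest
--     contiguous subarray containing all symbols from each scroll.
--     """
--
--     # Input validation
--     if not (all(c.islower() and c.isalpha() for c in astrolabe) and
--             len(set(astrolabe)) == len(astrolabe) and
--             all(all(s.islower() for s in scroll) for scroll in scrolls)):
--         return []
--
--     n = len(astrolabe)
--     results = []
--
--     for scroll in scrolls:
--         min_length = float('inf')  # Initialize with infinity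
--         for i in range(n):
--             j = i
--             scroll_index = 0
--             while scroll_index < len(scroll) and j < i + n:
--                 if astrolabe[j % n] == scroll[scroll_index]:
--                     scroll_index += 1
--                 j += 1
--             if scroll_index == len(scroll):
--                 min_length = min(min_length, j - i)
--         results.append(min_length if min_length != float('inf') else -1)
--
--     return results
-- ===== SOURCE B (Python) =====
-- def decipher_scrolls(astrolabe: str, scrolls: list[str]) -> list[int]:
--     # Same validation as the task demands: distinct lowercase astrolabe, lowercase scrolls.
--     if (any(not ('a' <= c <= 'z') for c in astrolabe)
--             or len(set(astrolabe)) != len(astrolabe)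
--             or any(not ('a' <= c <= 'z') for s in scrolls for c in s)):
--         return []
--     n = len(astrolabe)
--     pos = {c: i for i, c in enumerate(astrolabe)}
--     results = []
--     for scroll in scrolls:
--         if not scroll:
--             results.append(0 if n else -1)
--         elif any(c not in pos for c in scroll):
--             results.append(-1)
--         else:
--             cur = pos[scroll[0]]
--             w = 1
--             for c in scroll[1:]:
--                 w += (pos[c] - cur - 1) % n + 1
--                 cur = pos[c]
--             results.append(w if w <= n else -1)
--     return results
-- ===== Notes on version B (the rewrite author's own statement) =====
-- stated objective: alternative
-- what changed: Replaces A's per-scroll minimum over n restart scans (each greedily walking up to n circular positions) with a single position-jump pass: a char->index table is built once and the unique window length is the sum of modular forward jumps from the first symbol's position, compared against n.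
import Mathlib
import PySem

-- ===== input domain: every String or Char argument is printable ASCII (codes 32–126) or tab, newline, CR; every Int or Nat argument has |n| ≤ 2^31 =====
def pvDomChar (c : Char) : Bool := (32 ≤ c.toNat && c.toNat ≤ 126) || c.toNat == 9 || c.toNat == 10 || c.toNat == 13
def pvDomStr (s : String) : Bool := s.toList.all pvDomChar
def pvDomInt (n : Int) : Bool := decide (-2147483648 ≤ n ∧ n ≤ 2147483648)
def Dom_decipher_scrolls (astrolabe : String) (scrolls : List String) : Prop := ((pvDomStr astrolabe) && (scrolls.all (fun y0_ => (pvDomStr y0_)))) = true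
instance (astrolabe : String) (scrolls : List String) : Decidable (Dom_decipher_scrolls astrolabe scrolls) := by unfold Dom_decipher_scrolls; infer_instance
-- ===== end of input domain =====

-- B replaces A's minimum over n restart scans per scroll by a single position-jump pass
-- over the scroll using a char→index table (alternative algorithm; return values proved equal).

-- ===== PORT A =====
-- the inner `while scroll_index < len(scroll) and j < i + n` loop; the consumed prefix of the
-- scroll is tracked by the remaining suffix `rem` (rem = scroll[scroll_index:]); exact.
def whileA (cs : List Char) (lim j : Nat) (rem : List Char) : Nat × List Char :=
  match rem with
  | [] => (j, [])
  | c :: t =>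
    if _h : j < lim then
      -- astrolabe[j % n]: the getD default is never read (the loop only runs with 0 < n)
      whileA cs lim (j + 1) (if cs.getD (j % cs.length) ' ' = c then t else c :: t)
    else (j, c :: t)
termination_by lim - j
decreasing_by omega

-- body of `for i in range(n)`: min_length is `acc : Option Nat` (none = float('inf'))
def stepA (cs sc : List Char) (acc : Option Nat) (i : Nat) : Option Nat :=
  let r := whileA cs (i + cs.length) i sc
  if r.2 = [] then
    some (match acc with | none => r.1 - i | some m => min m (r.1 - i))
  else acc

-- one scroll: `min_length if min_length != float('inf') else -1`
def resultA (cs sc : List Char) : Int :=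
  match (List.range cs.length).foldl (stepA cs sc) none with
  | none => -1
  | some m => (m : Int)

def decipher_scrolls (astrolabe : String) (scrolls : List String) : List Int :=
  if ((astrolabe.toList.all fun c => PySem.Chars.islower c && PySem.Chars.isalpha c)
      && (PySem.Set.len (PySem.Set.ofList astrolabe.toList) == (astrolabe.toList.length : Int))
      && (scrolls.all fun scroll => scroll.toList.all fun s => PySem.Chars.islower s)) then
    scrolls.foldl (fun results scroll => results ++ [resultA astrolabe.toList scroll.toList]) []
  else []

-- ===== PORT B =====
-- body of `for c in scroll[1:]`: state (cur, w)
def jumpB (n : Int) (pos : PySem.Dict Char Int) (st : Int × Int) (c : Char) : Int × Int :=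
  (pos.getD c 0, st.2 + PySem.Int.mod (pos.getD c 0 - st.1 - 1) n + 1)

-- one scroll of B's loop
def scrollB (n : Int) (pos : PySem.Dict Char Int) (sc : List Char) : Int :=
  match sc with
  | [] => if n ≠ 0 then 0 else -1
  | c0 :: rest =>
    if (c0 :: rest).any (fun c => !pos.contains c) then -1
    else
      let st := rest.foldl (jumpB n pos) (pos.getD c0 0, 1)
      if st.2 ≤ n then st.2 else -1

def decipher_scrolls_alt (astrolabe : String) (scrolls : List String) : List Int :=
  if ((astrolabe.toList.any fun c => !(decide ('a' ≤ c) && decide (c ≤ 'z')))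
      || !(PySem.Set.len (PySem.Set.ofList astrolabe.toList) == (astrolabe.toList.length : Int))
      || (scrolls.any fun s => s.toList.any fun c => !(decide ('a' ≤ c) && decide (c ≤ 'z')))) then
    []
  else
    let n : Int := astrolabe.toList.length
    let pos : PySem.Dict Char Int :=
      (PySem.List.enumerate astrolabe.toList).foldl (fun d p => d.insert p.2 p.1) PySem.Dict.empty
    scrolls.foldl (fun results scroll => results ++ [scrollB n pos scroll.toList]) []

-- ===== PRECONDITION & SPEC =====
def Spec_decipher_scrolls (astrolabe : String) (scrolls : List String) (out : List Int) : Prop := out = decipher_scrolls_alt astrolabe scrolls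
instance (astrolabe : String) (scrolls : List String) (out : List Int) : Decidable (Spec_decipher_scrolls astrolabe scrolls out) := by unfold Spec_decipher_scrolls; infer_instance

-- ===== CLAIM (what is proved, stated in full; the proofs are below) =====
def Claim_equal_decipher_scrolls : Prop := ∀ (astrolabe : String) (scrolls : List String), Dom_decipher_scrolls astrolabe scrolls → Spec_decipher_scrolls astrolabe scrolls (decipher_scrolls astrolabe scrolls)

-- ===== LEMMAS AND PROOFS =====

-- unfolding equations for the while loop
lemma whileA_nil (cs : List Char) (lim j : Nat) : whileA cs lim j [] = (j, []) := by
  rw [whileA]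

lemma whileA_cons (cs : List Char) (lim j : Nat) (c : Char) (t : List Char) :
    whileA cs lim j (c :: t) =
      if j < lim then
        whileA cs lim (j + 1) (if cs.getD (j % cs.length) ' ' = c then t else c :: t)
      else (j, c :: t) := by
  rw [whileA]
  rfl

-- greedy cost: number of circular steps (chars consumed) to match the scroll starting at residue r
def cost (cs : List Char) : Nat → List Char → Nat
  | _, [] => 0
  | r, c :: t => (cs.idxOf c + cs.length - r) % cs.length + 1 + cost cs ((cs.idxOf c + 1) % cs.length) t

lemma mod_shift {n p r : Nat} (hp : p < n) (hr : r < n) :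
    (p + n - r) % n = if r ≤ p then p - r else p + n - r := by
  split_ifs with h
  · have e : p + n - r = (p - r) + n := by omega
    rw [e, Nat.add_mod_right, Nat.mod_eq_of_lt (by omega)]
  · exact Nat.mod_eq_of_lt (by omega)

lemma add_mod_left' (j x n : Nat) : (j + x) % n = (j % n + x) % n := by
  rw [Nat.add_mod, Nat.add_mod (j % n) x, Nat.mod_mod_of_dvd _ dvd_rfl]

lemma mod_add_jump {n p j : Nat} (hp : p < n) :
    (j + (p + n - j % n) % n) % n = p := by
  have hr : j % n < n := Nat.mod_lt _ (by omega)
  rw [mod_shift hp hr, add_mod_left']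
  split_ifs with h
  · rw [show j % n + (p - j % n) = p by omega]
    exact Nat.mod_eq_of_lt hp
  · rw [show j % n + (p + n - j % n) = p + n by omega, Nat.add_mod_right]
    exact Nat.mod_eq_of_lt hp

lemma mod_succ_of_mod {n a p : Nat} (h : a % n = p) : (a + 1) % n = (p + 1) % n := by
  rw [add_mod_left', h]

lemma mod_step {n p j d : Nat} (hp : p < n) (h : (p + n - j % n) % n = d + 1) :
    (p + n - (j + 1) % n) % n = d := by
  have hr : j % n < n := Nat.mod_lt _ (by omega)
  rw [mod_shift hp hr] at h
  rw [add_mod_left' j 1 n]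
  by_cases hrn : j % n + 1 = n
  · rw [hrn, Nat.mod_self, Nat.sub_zero, Nat.add_mod_right, Nat.mod_eq_of_lt hp]
    split_ifs at h <;> omega
  · rw [Nat.mod_eq_of_lt (show j % n + 1 < n by omega), mod_shift hp (by omega)]
    split_ifs at h ⊢ <;> omega

lemma mod_zero_eq {n p j : Nat} (hp : p < n) (h : (p + n - j % n) % n = 0) :
    j % n = p := by
  have hr : j % n < n := Nat.mod_lt _ (by omega)
  rw [mod_shift hp hr] at h
  split_ifs at h <;> omega

lemma whileA_jump (cs : List Char) (hnd : cs.Nodup) {c : Char} (hc : c ∈ cs) (t : List Char) :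
    ∀ (d j lim : Nat), j ≤ lim →
      (cs.idxOf c + cs.length - j % cs.length) % cs.length = d →
      whileA cs lim j (c :: t) =
        if j + d < lim then whileA cs lim (j + d + 1) t else (lim, c :: t) := by
  have hp : cs.idxOf c < cs.length := List.idxOf_lt_length_of_mem hc
  have hn : 0 < cs.length := by omega
  intro d
  induction d with
  | zero =>
    intro j lim hjl hd
    have hjp : j % cs.length = cs.idxOf c := mod_zero_eq hp hd
    rw [whileA_cons]
    by_cases hjlim : j < lim
    · have hmatch : cs.getD (j % cs.length) ' ' = c := by
        rw [hjp, List.getD_eq_getElem _ _ hp, List.getElem_idxOf hp]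
      rw [if_pos hjlim, if_pos hmatch, if_pos (by omega)]
    · rw [if_neg hjlim, if_neg (show ¬ (j + 0 < lim) by omega)]
      have : j = lim := by omega
      rw [this]
  | succ d ih =>
    intro j lim hjl hd
    rw [whileA_cons]
    by_cases hjlim : j < lim
    · have hne : cs.getD (j % cs.length) ' ' ≠ c := by
        intro he
        have hr : j % cs.length < cs.length := Nat.mod_lt _ hn
        rw [List.getD_eq_getElem _ _ hr] at he
        have he2 : cs[j % cs.length] = cs[cs.idxOf c] := by
          rw [he, List.getElem_idxOf hp]
        have := (List.Nodup.getElem_inj_iff hnd).mp he2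
        have : j % cs.length = cs.idxOf c := this
        rw [mod_shift hp hr] at hd
        split_ifs at hd <;> omega
      rw [if_pos hjlim, if_neg hne]
      rw [ih (j + 1) lim (by omega) (mod_step hp hd)]
      have : j + 1 + d = j + (d + 1) := by omega
      rw [this]
    · have : ¬ (j + (d + 1) < lim) := by omega
      rw [if_neg hjlim, if_neg this]
      have : j = lim := by omega
      rw [this]

lemma whileA_absent (cs : List Char) (hn : 0 < cs.length) {c : Char} (hc : c ∉ cs) (t : List Char) :
    ∀ (f j lim : Nat), j ≤ lim → lim - j = f → whileA cs lim j (c :: t) = (lim, c :: t) := by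
  intro f
  induction f with
  | zero =>
    intro j lim hjl hf
    have : j = lim := by omega
    subst this
    rw [whileA_cons, if_neg (by omega)]
  | succ f ih =>
    intro j lim hjl hf
    have hjlim : j < lim := by omega
    have hne : cs.getD (j % cs.length) ' ' ≠ c := by
      intro he
      have hr : j % cs.length < cs.length := Nat.mod_lt _ hn
      rw [List.getD_eq_getElem _ _ hr] at he
      exact hc (he ▸ List.getElem_mem hr)
    rw [whileA_cons, if_pos hjlim, if_neg hne]
    exact ih (j + 1) lim (by omega) (by omega)

lemma whileA_cost (cs : List Char) (hnd : cs.Nodup) (hn : 0 < cs.length) :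
    ∀ (l : List Char), (∀ c ∈ l, c ∈ cs) → ∀ (j lim : Nat), j ≤ lim →
      (j + cost cs (j % cs.length) l ≤ lim → whileA cs lim j l = (j + cost cs (j % cs.length) l, []))
      ∧ (lim < j + cost cs (j % cs.length) l →
          (whileA cs lim j l).1 = lim ∧ (whileA cs lim j l).2 ≠ []) := by
  intro l
  induction l with
  | nil =>
    intro _ j lim hjl
    refine ⟨fun _ => ?_, fun h => ?_⟩
    · rw [whileA_nil]; simp [cost]
    · exfalso; simp [cost] at h; omega
  | cons c t ih =>
    intro hch j lim hjl
    have hc : c ∈ cs := hch c List.mem_cons_self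
    have hp : cs.idxOf c < cs.length := List.idxOf_lt_length_of_mem hc
    have hcost : cost cs (j % cs.length) (c :: t) =
        (cs.idxOf c + cs.length - j % cs.length) % cs.length + 1
          + cost cs ((cs.idxOf c + 1) % cs.length) t := rfl
    set d := (cs.idxOf c + cs.length - j % cs.length) % cs.length with hd
    rw [whileA_jump cs hnd hc t d j lim hjl hd.symm]
    have hmod : (j + d + 1) % cs.length = (cs.idxOf c + 1) % cs.length :=
      mod_succ_of_mod (mod_add_jump hp)
    by_cases hlt : j + d < lim
    · rw [if_pos hlt]
      have hIH := ih (fun x hx => hch x (List.mem_cons_of_mem c hx)) (j + d + 1) lim (by omega)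
      rw [hmod] at hIH
      constructor
      · intro h
        rw [hIH.1 (by rw [hcost] at h; omega)]
        rw [hcost]
        congr 1
        omega
      · intro h
        exact hIH.2 (by rw [hcost] at h; omega)
    · rw [if_neg hlt]
      constructor
      · intro h; exfalso; rw [hcost] at h; omega
      · intro _; exact ⟨rfl, by simp⟩

lemma whileA_fail_absent (cs : List Char) (hnd : cs.Nodup) (hn : 0 < cs.length) :
    ∀ (l : List Char), (∃ c ∈ l, c ∉ cs) → ∀ (j lim : Nat), j ≤ lim →
      (whileA cs lim j l).2 ≠ [] := by
  intro l
  induction l with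
  | nil => rintro ⟨c, hc, _⟩; exact absurd hc List.not_mem_nil
  | cons c t ih =>
    rintro ⟨x, hx, hxcs⟩ j lim hjl
    by_cases hc : c ∈ cs
    · have hp : cs.idxOf c < cs.length := List.idxOf_lt_length_of_mem hc
      rw [whileA_jump cs hnd hc t _ j lim hjl rfl]
      split_ifs with hlt
      · have hxt : x ∈ t := by
          rcases List.mem_cons.mp hx with h | h
          · exact absurd (h ▸ hxcs) (fun hh => hh hc)
          · exact h
        exact ih ⟨x, hxt, hxcs⟩ (j + _ + 1) lim (by omega)
      · simp
    · rw [whileA_absent cs hn hc t (lim - j) j lim hjl rfl]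
      simp

-- ---- A-side: the fold over starting positions ----

lemma stepA_succ (cs l : List Char) (hnd : cs.Nodup) (hn : 0 < cs.length)
    (hch : ∀ c ∈ l, c ∈ cs) (i : Nat) (hi : i < cs.length)
    (hcost : cost cs i l ≤ cs.length) (acc : Option Nat) :
    stepA cs l acc i =
      some (match acc with | none => cost cs i l | some m => min m (cost cs i l)) := by
  have him : i % cs.length = i := Nat.mod_eq_of_lt hi
  have h := (whileA_cost cs hnd hn l hch i (i + cs.length) (by omega)).1 (by rw [him]; omega)
  rw [him] at h
  unfold stepA
  have he : i + cost cs i l - i = cost cs i l := by omega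
  rw [h]
  simp [he]

lemma stepA_fail (cs l : List Char) (hnd : cs.Nodup) (hn : 0 < cs.length)
    (hch : ∀ c ∈ l, c ∈ cs) (i : Nat) (hi : i < cs.length)
    (hcost : cs.length < cost cs i l) (acc : Option Nat) :
    stepA cs l acc i = acc := by
  have him : i % cs.length = i := Nat.mod_eq_of_lt hi
  have h := (whileA_cost cs hnd hn l hch i (i + cs.length) (by omega)).2 (by rw [him]; omega)
  unfold stepA
  rw [if_neg h.2]

lemma stepA_fail_absent (cs l : List Char) (hnd : cs.Nodup) (hn : 0 < cs.length)
    (hex : ∃ c ∈ l, c ∉ cs) (i : Nat) (acc : Option Nat) :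
    stepA cs l acc i = acc := by
  have h := whileA_fail_absent cs hnd hn l hex i (i + cs.length) (by omega)
  unfold stepA
  rw [if_neg h]

lemma foldl_id {α β : Type} (f : β → α → β) (is : List α) (acc : β)
    (h : ∀ (a : β) (i : α), i ∈ is → f a i = a) : is.foldl f acc = acc := by
  induction is generalizing acc with
  | nil => rfl
  | cons i t ih =>
    rw [List.foldl_cons, h acc i List.mem_cons_self]
    exact ih acc (fun a x hx => h a x (List.mem_cons_of_mem i hx))

lemma foldl_const_some {α : Type} (f : Option Nat → α → Option Nat) (is : List α)
    (acc : Option Nat) (v : Nat) (h : ∀ (a : Option Nat) (i : α), i ∈ is → f a i = some v)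
    (hne : is ≠ []) : is.foldl f acc = some v := by
  induction is generalizing acc with
  | nil => exact absurd rfl hne
  | cons i t ih =>
    rw [List.foldl_cons, h acc i List.mem_cons_self]
    by_cases ht : t = []
    · subst ht; rfl
    · exact ih (some v) (fun a x hx => h a x (List.mem_cons_of_mem i hx)) ht

def accGE (W : Nat) (acc : Option Nat) : Prop :=
  acc = none ∨ ∃ m, acc = some m ∧ W ≤ m

lemma foldl_stepA_ge (cs l : List Char) (hnd : cs.Nodup) (hn : 0 < cs.length)
    (hch : ∀ c ∈ l, c ∈ cs) (W : Nat) (hW : ∀ i, W ≤ cost cs i l) :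
    ∀ (is : List Nat), (∀ i ∈ is, i < cs.length) → ∀ acc, accGE W acc →
      accGE W (is.foldl (stepA cs l) acc) := by
  intro is
  induction is with
  | nil => intro _ acc h; exact h
  | cons i t ih =>
    intro his acc hacc
    rw [List.foldl_cons]
    refine ih (fun x hx => his x (List.mem_cons_of_mem i hx)) _ ?_
    by_cases hcost : cost cs i l ≤ cs.length
    · rw [stepA_succ cs l hnd hn hch i (his i List.mem_cons_self) hcost acc]
      rcases hacc with h | ⟨m, hm, hWm⟩
      · subst h; exact Or.inr ⟨cost cs i l, rfl, hW i⟩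
      · subst hm; exact Or.inr ⟨min m (cost cs i l), rfl, le_min hWm (hW i)⟩
    · rw [stepA_fail cs l hnd hn hch i (his i List.mem_cons_self) (by omega) acc]
      exact hacc

lemma foldl_stepA_keep (cs l : List Char) (hnd : cs.Nodup) (hn : 0 < cs.length)
    (hch : ∀ c ∈ l, c ∈ cs) (W : Nat) (hW : ∀ i, W ≤ cost cs i l) :
    ∀ (is : List Nat), (∀ i ∈ is, i < cs.length) →
      is.foldl (stepA cs l) (some W) = some W := by
  intro is
  induction is with
  | nil => intro _; rfl
  | cons i t ih
  => by_cases hcost : cost cs i l ≤ cs.length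
     · intro his
       rw [List.foldl_cons,
         stepA_succ cs l hnd hn hch i (his i List.mem_cons_self) hcost (some W)]
       show List.foldl (stepA cs l) (some (min W (cost cs i l))) t = some W
       rw [min_eq_left (hW i)]
       exact ih (fun x hx => his x (List.mem_cons_of_mem i hx))
     · intro his
       rw [List.foldl_cons,
         stepA_fail cs l hnd hn hch i (his i List.mem_cons_self) (by omega) (some W)]
       exact ih (fun x hx => his x (List.mem_cons_of_mem i hx))

lemma resultA_present (cs : List Char) (hnd : cs.Nodup) (c0 : Char) (rest : List Char)
    (hch : ∀ c ∈ (c0 :: rest), c ∈ cs) :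
    resultA cs (c0 :: rest) =
      if 1 + cost cs ((cs.idxOf c0 + 1) % cs.length) rest ≤ cs.length then
        ((1 + cost cs ((cs.idxOf c0 + 1) % cs.length) rest : Nat) : Int)
      else -1 := by
  have hc0 : c0 ∈ cs := hch c0 List.mem_cons_self
  have hp0 : cs.idxOf c0 < cs.length := List.idxOf_lt_length_of_mem hc0
  have hn : 0 < cs.length := by omega
  set K := cost cs ((cs.idxOf c0 + 1) % cs.length) rest with hK
  set W := 1 + K with hWdef
  have hcost_cons : ∀ r, cost cs r (c0 :: rest) =
      (cs.idxOf c0 + cs.length - r) % cs.length + 1 + K := fun r => rfl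
  have hW : ∀ i, W ≤ cost cs i (c0 :: rest) := by
    intro i; rw [hcost_cons]; omega
  have hWp0 : cost cs (cs.idxOf c0) (c0 :: rest) = W := by
    rw [hcost_cons, show cs.idxOf c0 + cs.length - cs.idxOf c0 = cs.length by omega,
      Nat.mod_self]
  unfold resultA
  by_cases hWn : W ≤ cs.length
  · have hsplit : List.range cs.length =
        List.range (cs.idxOf c0) ++ cs.idxOf c0 ::
          List.map (fun x => cs.idxOf c0 + (x + 1)) (List.range (cs.length - cs.idxOf c0 - 1)) := by
      have h1 : cs.length = cs.idxOf c0 + (cs.length - cs.idxOf c0 - 1 + 1) := by omega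
      rw [h1, List.range_add, List.range_succ_eq_map]
      simp [Function.comp]
    rw [hsplit, List.foldl_append]
    have hge := foldl_stepA_ge cs (c0 :: rest) hnd hn hch W hW (List.range (cs.idxOf c0))
      (fun x hx => by have := List.mem_range.mp hx; omega) none (Or.inl rfl)
    rw [List.foldl_cons]
    have hstep : stepA cs (c0 :: rest) (List.foldl (stepA cs (c0 :: rest)) none
        (List.range (cs.idxOf c0))) (cs.idxOf c0) = some W := by
      rw [stepA_succ cs (c0 :: rest) hnd hn hch (cs.idxOf c0) hp0 (by rw [hWp0]; exact hWn) _]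
      rcases hge with h | ⟨m, hm, hWm⟩
      · rw [h, hWp0]
      · rw [hm, hWp0]
        show some (min m W) = some W
        rw [min_eq_right hWm]
    rw [hstep]
    rw [foldl_stepA_keep cs (c0 :: rest) hnd hn hch W hW _
      (fun x hx => by
        rcases List.mem_map.mp hx with ⟨y, hy, he⟩
        have := List.mem_range.mp hy
        omega)]
    rw [if_pos hWn]
  · have hall : List.foldl (stepA cs (c0 :: rest)) none (List.range cs.length) = none := by
      apply foldl_id
      intro a i hi
      exact stepA_fail cs (c0 :: rest) hnd hn hch i (List.mem_range.mp hi)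
        (by have := hW i; omega) a
    rw [hall, if_neg hWn]

-- ---- B-side: the position dictionary and the jump fold ----

def posD (cs : List Char) : PySem.Dict Char Int :=
  (PySem.List.enumerate cs).foldl (fun d p => d.insert p.2 p.1) PySem.Dict.empty

lemma posD_keys (cs : List Char) (hnd : cs.Nodup) : (posD cs).keys = cs := by
  unfold posD
  rw [PySem.Dict.keys_foldl_insert_key (PySem.List.enumerate cs) (fun p => p.2) (fun _ p => p.1)
    PySem.Dict.empty]
  rw [PySem.Dict.keys_empty, PySem.Set.update_nil_left, PySem.List.map_snd_enumerate]
  exact PySem.Set.ofList_eq_self_of_nodup cs hnd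

lemma posD_items (cs : List Char) (hnd : cs.Nodup) :
    (posD cs).items = (PySem.List.enumerate cs).map (fun p => (p.2, p.1)) := by
  unfold posD
  rw [PySem.Dict.items_foldl_insert_fresh (PySem.List.enumerate cs) (fun p => p.2) (fun p => p.1)
    PySem.Dict.empty (fun a _ => PySem.Dict.contains_empty a.2)
    (by rw [PySem.List.map_snd_enumerate]; exact hnd)]
  rfl

lemma posD_contains (cs : List Char) (hnd : cs.Nodup) (c : Char) :
    (posD cs).contains c = true ↔ c ∈ cs := by
  rw [PySem.Dict.contains_iff_mem_keys, posD_keys cs hnd]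

lemma posD_getD (cs : List Char) (hnd : cs.Nodup) {c : Char} (hc : c ∈ cs) :
    (posD cs).getD c 0 = (cs.idxOf c : Int) := by
  apply PySem.Dict.getD_of_mem_items
  · rw [posD_items cs hnd]
    apply List.mem_map.mpr
    refine ⟨((cs.idxOf c : Int), c), ?_, rfl⟩
    apply (PySem.List.mem_enumerate_iff cs 0 _).mpr
    refine ⟨cs.idxOf c, List.idxOf_lt_length_of_mem hc, ?_⟩
    rw [List.getElem_idxOf (List.idxOf_lt_length_of_mem hc)]
    simp
  · rw [posD_keys cs hnd]; exact hnd

lemma int_jump {n p q : Nat} (hn : 0 < n) (hp : p < n) (hq : q < n) :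
    PySem.Int.mod ((p : Int) - q - 1) n = (((p + n - (q + 1) % n) % n : Nat) : Int) := by
  rw [PySem.Int.mod_eq_emod_of_pos (by exact_mod_cast hn)]
  have h1 : (p : Int) - q - 1 = ((p + n - q - 1 : Nat) : Int) - n := by omega
  rw [h1, Int.sub_emod, Int.emod_self, sub_zero, Int.emod_emod_of_dvd _ dvd_rfl]
  have h2 : (p + n - (q + 1) % n) % n = (p + n - q - 1) % n := by
    by_cases h : q + 1 = n
    · rw [h, Nat.mod_self, Nat.sub_zero, Nat.add_mod_right,
        show p + n - q - 1 = p by omega, Nat.mod_eq_of_lt hp]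
    · rw [Nat.mod_eq_of_lt (show q + 1 < n by omega),
        show p + n - (q + 1) = p + n - q - 1 by omega]
  rw [h2]
  norm_cast

lemma foldB (cs : List Char) (hnd : cs.Nodup) (hn : 0 < cs.length) :
    ∀ (t : List Char) (q : Nat) (w0 : Int), q < cs.length → (∀ c ∈ t, c ∈ cs) →
      (t.foldl (jumpB (cs.length : Int) (posD cs)) ((q : Int), w0)).2 =
        w0 + (cost cs ((q + 1) % cs.length) t : Int) := by
  intro t
  induction t with
  | nil => intro q w0 _ _; simp [cost]
  | cons c t ih =>
    intro q w0 hq hch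
    have hc : c ∈ cs := hch c List.mem_cons_self
    have hp : cs.idxOf c < cs.length := List.idxOf_lt_length_of_mem hc
    rw [List.foldl_cons]
    have hjump : jumpB (cs.length : Int) (posD cs) ((q : Int), w0) c =
        ((cs.idxOf c : Int),
          w0 + ((((cs.idxOf c + cs.length - (q + 1) % cs.length) % cs.length : Nat) : Int) + 1)) := by
      unfold jumpB
      rw [posD_getD cs hnd hc, int_jump hn hp hq]
      rw [add_assoc]
    rw [hjump,
      ih (cs.idxOf c) _ hp (fun x hx => hch x (List.mem_cons_of_mem c hx))]
    have hcost : cost cs ((q + 1) % cs.length) (c :: t) =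
        (cs.idxOf c + cs.length - (q + 1) % cs.length) % cs.length + 1
          + cost cs ((cs.idxOf c + 1) % cs.length) t := rfl
    rw [hcost]
    push_cast
    ring

-- ---- validation and assembly ----

lemma ofList_sublist {α : Type} [BEq α] [LawfulBEq α] (xs : List α) :
    List.Sublist (PySem.Set.ofList xs) xs := by
  induction xs using List.reverseRecOn with
  | nil => simp [PySem.Set.ofList_nil]
  | append_singleton xs x ih =>
    rw [PySem.Set.ofList_append_singleton]
    by_cases h : PySem.Set.contains (PySem.Set.ofList xs) x = true
    · simp only [PySem.Set.add, h, if_pos]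
      exact ih.trans (List.sublist_append_left xs [x])
    · have hfalse : PySem.Set.contains (PySem.Set.ofList xs) x = false := by
        cases hh : PySem.Set.contains (PySem.Set.ofList xs) x
        · rfl
        · exact absurd hh h
      simp only [PySem.Set.add, hfalse, Bool.false_eq_true, if_false]
      exact List.Sublist.append ih (List.Sublist.refl [x])

lemma nodup_of_len (cs : List Char)
    (h : (PySem.Set.len (PySem.Set.ofList cs) == (cs.length : Int)) = true) : cs.Nodup := by
  have hlen : (PySem.Set.ofList cs).length = cs.length := by
    have := beq_iff_eq.mp h
    simp only [PySem.Set.len] at this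
    exact_mod_cast this
  have heq : PySem.Set.ofList cs = cs := List.Sublist.eq_of_length (ofList_sublist cs) hlen
  rw [← heq]
  exact PySem.Set.nodup_ofList cs

lemma any_not_all {α : Type} (xs : List α) (p : α → Bool) :
    xs.any (fun x => !p x) = !xs.all p := by
  induction xs with
  | nil => rfl
  | cons x t ih => simp [List.any_cons, List.all_cons, ih, Bool.not_and]

lemma islower_and_isalpha (c : Char) :
    (PySem.Chars.islower c && PySem.Chars.isalpha c) = (decide ('a' ≤ c) && decide (c ≤ 'z')) := by
  have ha : PySem.Chars.isalpha c = (PySem.Chars.isupper c || PySem.Chars.islower c) := rfl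
  have hl : PySem.Chars.islower c = (decide ('a' ≤ c) && decide (c ≤ 'z')) := rfl
  rw [← hl, ha]
  cases h : PySem.Chars.islower c <;> simp_all

lemma scroll_eq (cs : List Char) (hnd : cs.Nodup) (l : List Char) :
    resultA cs l = scrollB (cs.length : Int) (posD cs) l := by
  cases l with
  | nil =>
    by_cases hn : cs.length = 0
    · unfold resultA scrollB
      rw [hn]
      simp
    · unfold resultA scrollB
      have hstep : ∀ (a : Option Nat) (i : Nat), i ∈ List.range cs.length →
          stepA cs [] a i = some 0 := by
        intro a i _
        unfold stepA
        rw [whileA_nil]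
        cases a <;> simp
      rw [foldl_const_some _ _ _ 0 hstep (by simp [List.range_eq_nil, hn])]
      have hne : cs ≠ [] := fun h => hn (by rw [h]; rfl)
      simp [hne]
  | cons c0 rest =>
    by_cases hall : ∀ c ∈ (c0 :: rest), c ∈ cs
    · have hc0 : c0 ∈ cs := hall c0 List.mem_cons_self
      have hp0 : cs.idxOf c0 < cs.length := List.idxOf_lt_length_of_mem hc0
      have hn : 0 < cs.length := by omega
      have hanyf : ((c0 :: rest).any fun c => !(posD cs).contains c) = false := by
        rw [List.any_eq_false]
        intro c hc
        have := (posD_contains cs hnd c).mpr (hall c hc)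
        simp [this]
      unfold scrollB
      dsimp only
      rw [hanyf]
      simp only [Bool.false_eq_true, if_false]
      rw [posD_getD cs hnd hc0]
      rw [foldB cs hnd hn rest (cs.idxOf c0) 1 hp0
        (fun x hx => hall x (List.mem_cons_of_mem c0 hx))]
      rw [resultA_present cs hnd c0 rest hall]
      by_cases hW : 1 + cost cs ((cs.idxOf c0 + 1) % cs.length) rest ≤ cs.length
      · rw [if_pos hW, if_pos (by exact_mod_cast hW)]
        push_cast
        ring
      · rw [if_neg hW, if_neg (by exact_mod_cast hW)]
    · push_neg at hall
      obtain ⟨x, hx, hxcs⟩ := hall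
      have hanyt : ((c0 :: rest).any fun c => !(posD cs).contains c) = true := by
        rw [List.any_eq_true]
        refine ⟨x, hx, ?_⟩
        have hcon : (posD cs).contains x = false := by
          cases h : (posD cs).contains x
          · rfl
          · exact absurd ((posD_contains cs hnd x).mp h) hxcs
        simp [hcon]
      unfold scrollB
      dsimp only
      rw [hanyt]
      simp only [if_pos]
      unfold resultA
      by_cases hn : cs.length = 0
      · rw [hn]; simp
      · rw [foldl_id _ _ _ (fun a i _ =>
          stepA_fail_absent cs (c0 :: rest) hnd (by omega) ⟨x, hx, hxcs⟩ i a)]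

-- ===== VERDICT (by name: the statement is the Claim_ definition above) =====
theorem decipher_scrolls_spec : Claim_equal_decipher_scrolls := by
  intro astrolabe scrolls _
  unfold Spec_decipher_scrolls decipher_scrolls decipher_scrolls_alt
  have hflip : ∀ (xs : List Char),
      (xs.all fun c => PySem.Chars.islower c && PySem.Chars.isalpha c)
        = (xs.all fun c => decide ('a' ≤ c) && decide (c ≤ 'z')) := by
    intro xs
    rw [show (fun c => PySem.Chars.islower c && PySem.Chars.isalpha c)
        = (fun c => decide ('a' ≤ c) && decide (c ≤ 'z')) from funext islower_and_isalpha]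
  have hlow : ∀ (xs : List Char),
      (xs.all fun c => PySem.Chars.islower c)
        = (xs.all fun c => decide ('a' ≤ c) && decide (c ≤ 'z')) := by
    intro xs
    rfl
  set a := astrolabe.toList.all (fun c => decide ('a' ≤ c) && decide (c ≤ 'z')) with ha
  set sOK := (PySem.Set.len (PySem.Set.ofList astrolabe.toList)
      == (astrolabe.toList.length : Int)) with hs
  set m := scrolls.all (fun sc => sc.toList.all fun c => decide ('a' ≤ c) && decide (c ≤ 'z'))
    with hm
  have hAcond : ((astrolabe.toList.all fun c => PySem.Chars.islower c && PySem.Chars.isalpha c)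
      && sOK && (scrolls.all fun scroll => scroll.toList.all fun s => PySem.Chars.islower s))
      = (a && sOK && m) := by
    rw [hflip]
    have : (scrolls.all fun scroll => scroll.toList.all fun s => PySem.Chars.islower s) = m := by
      rw [hm]
      rw [show (fun (scroll : String) => scroll.toList.all fun s => PySem.Chars.islower s)
          = (fun (sc : String) => sc.toList.all fun c => decide ('a' ≤ c) && decide (c ≤ 'z'))
          from funext fun sc => hlow sc.toList]
    rw [this]
  have hBcond : ((astrolabe.toList.any fun c => !(decide ('a' ≤ c) && decide (c ≤ 'z')))
      || !sOK
      || (scrolls.any fun s => s.toList.any fun c => !(decide ('a' ≤ c) && decide (c ≤ 'z'))))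
      = !(a && sOK && m) := by
    rw [any_not_all]
    have : (scrolls.any fun s => s.toList.any fun c => !(decide ('a' ≤ c) && decide (c ≤ 'z')))
        = !m := by
      rw [hm, ← any_not_all]
      rw [show (fun (s : String) => s.toList.any fun c => !(decide ('a' ≤ c) && decide (c ≤ 'z')))
          = (fun (x : String) => !(x.toList.all fun c => decide ('a' ≤ c) && decide (c ≤ 'z')))
          from funext fun s => any_not_all s.toList _]
    rw [this, ← ha]
    cases a <;> cases sOK <;> cases m <;> rfl
  rw [hAcond, hBcond]
  by_cases hcond : (a && sOK && m) = true
  · rw [if_pos hcond, hcond]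
    simp only [Bool.not_true, Bool.false_eq_true, if_false]
    have hnd : astrolabe.toList.Nodup := nodup_of_len astrolabe.toList (by
      have := hcond
      rw [Bool.and_assoc] at this
      have h2 := (Bool.and_eq_true _ _).mp this
      exact ((Bool.and_eq_true _ _).mp h2.2).1)
    rw [PySem.List.foldl_append_singleton_eq_map, PySem.List.foldl_append_singleton_eq_map]
    simp only [List.nil_append]
    apply List.map_congr_left
    intro sc _
    exact scroll_eq astrolabe.toList hnd sc.toList
  · have hfalse : (a && sOK && m) = false := by
      revert hcond; cases (a && sOK && m) <;> simp
    rw [if_neg hcond, hfalse]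
    simp
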